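-- pv_equiv track=rewrite | github.com/maxwshen/piu-analysis | src/hmm_segment.py | seg_list_to_list_of_bounds
-- ===== SOURCE A (Python) =====
-- def seg_list_to_list_of_bounds(idxs, segs):
--   # List of N ints -> List of segments by boundary changes
--   i = 0
--   bounds = []
--   while i < len(segs):
--     j = i + 1
--     while j < len(segs) and segs[j] == segs[i]:
--       j += 1
--     bounds.append((idxs[i], idxs[j]))
--     i = j
--   return bounds
-- ===== SOURCE B (Python) =====
-- def seg_list_to_list_of_bounds(idxs, segs):
--   # List of N ints -> List of segments by boundary changes
--   if not segs:
--     return []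
--   cps = [0] + [k for k in range(1, len(segs)) if segs[k] != segs[k-1]] + [len(segs)]
--   return [(idxs[a], idxs[b]) for a, b in zip(cps, cps[1:])]
-- ===== Notes on version B (the rewrite author's own statement) =====
-- stated objective: alternative
-- what changed: Replaces the nested while-loops that scan each run with a flat two-phase method: one comprehension collecting change-point indices, then pairing consecutive change points with zip.
import Mathlib
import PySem

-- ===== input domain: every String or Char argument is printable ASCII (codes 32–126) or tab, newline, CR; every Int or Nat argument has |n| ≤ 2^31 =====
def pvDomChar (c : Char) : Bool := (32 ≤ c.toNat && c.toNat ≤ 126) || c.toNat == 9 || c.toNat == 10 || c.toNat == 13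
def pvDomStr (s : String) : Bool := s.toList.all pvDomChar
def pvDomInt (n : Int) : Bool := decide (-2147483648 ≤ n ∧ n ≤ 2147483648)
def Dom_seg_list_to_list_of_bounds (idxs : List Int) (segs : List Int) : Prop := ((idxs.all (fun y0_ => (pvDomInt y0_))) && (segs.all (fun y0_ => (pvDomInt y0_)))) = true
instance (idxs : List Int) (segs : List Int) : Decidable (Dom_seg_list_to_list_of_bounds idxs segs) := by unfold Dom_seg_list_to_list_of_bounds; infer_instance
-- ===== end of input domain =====

-- B is an alternative decomposition (change-point scan + zip pairing) of A's nested run-scanning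
-- while-loops; same O(n) cost; equivalence of return values is proved on Pre_ (where A returns).

-- ===== PORT A =====
-- inner while: 'while j < len(segs) and segs[j] == segs[i]: j += 1'
-- (indices are in range whenever the guard holds, so List.getD is exact here)
def segARun (segs : List Int) (i j : Nat) : Nat :=
  if j < segs.length ∧ segs.getD j 0 = segs.getD i 0 then segARun segs i (j+1) else j
termination_by segs.length - j

theorem segARun_ge (segs : List Int) (i j : Nat) : j ≤ segARun segs i j := by
  rw [segARun]
  split
  · exact Nat.le_trans (Nat.le_succ j) (segARun_ge segs i (j+1))
  · exact Nat.le_refl j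
termination_by segs.length - j

-- outer while over i; idxs[i]/idxs[j] via getD (Pre_ guarantees those indices are in range)
def segALoop (idxs segs : List Int) (i : Nat) : List (Int × Int) :=
  if h : i < segs.length then
    let j := segARun segs i (i+1)
    (idxs.getD i 0, idxs.getD j 0) :: segALoop idxs segs j
  else []
termination_by segs.length - i
decreasing_by
  have := segARun_ge segs i (i+1)
  omega

def seg_list_to_list_of_bounds (idxs : List Int) (segs : List Int) : List (Int × Int) :=
  segALoop idxs segs 0

-- ===== PORT B =====
def seg_list_to_list_of_bounds_alt (idxs : List Int) (segs : List Int) : List (Int × Int) :=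
  if segs = [] then []
  else
    let cps : List Nat :=
      0 :: (List.range' 1 (segs.length - 1)).filter
             (fun k => segs.getD k 0 ≠ segs.getD (k-1) 0) ++ [segs.length]
    (cps.zip cps.tail).map (fun p => (idxs.getD p.1 0, idxs.getD p.2 0))

-- ===== PRECONDITION & SPEC =====
-- Pre_ is exactly where Python A returns: on nonempty segs A always reads idxs[len(segs)]
-- (and run starts below it), so it raises IndexError iff len(idxs) ≤ len(segs).
def Pre_seg_list_to_list_of_bounds (idxs : List Int) (segs : List Int) : Prop :=
  segs = [] ∨ segs.length < idxs.length
instance (idxs : List Int) (segs : List Int) : Decidable (Pre_seg_list_to_list_of_bounds idxs segs) := by unfold Pre_seg_list_to_list_of_bounds; infer_instance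

def pvWitness_seg_list_to_list_of_bounds : List Int × List Int := ([10, 20, 30, 40], [7, 7, 9])

def Spec_seg_list_to_list_of_bounds (idxs : List Int) (segs : List Int) (out : List (Int × Int)) : Prop := out = seg_list_to_list_of_bounds_alt idxs segs
instance (idxs : List Int) (segs : List Int) (out : List (Int × Int)) : Decidable (Spec_seg_list_to_list_of_bounds idxs segs out) := by unfold Spec_seg_list_to_list_of_bounds; infer_instance

-- ===== CLAIM (what is proved, stated in full; the proofs are below) =====
def Claim_equal_seg_list_to_list_of_bounds : Prop := ∀ (idxs : List Int) (segs : List Int), Dom_seg_list_to_list_of_bounds idxs segs → Pre_seg_list_to_list_of_bounds idxs segs → Spec_seg_list_to_list_of_bounds idxs segs (seg_list_to_list_of_bounds idxs segs)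

-- ===== LEMMAS AND PROOFS =====

-- pairing a change-point list (B's zip-with-tail) as a recursion
def mapPairs (idxs : List Int) : List Nat → List (Int × Int)
  | a :: b :: rest => (idxs.getD a 0, idxs.getD b 0) :: mapPairs idxs (b :: rest)
  | _ => []

theorem zip_tail_eq_mapPairs (idxs : List Int) (cps : List Nat) :
    (cps.zip cps.tail).map (fun p => (idxs.getD p.1 0, idxs.getD p.2 0)) = mapPairs idxs cps := by
  match cps with
  | [] => rfl
  | [a] => rfl
  | a :: b :: rest =>
      simp only [List.tail, List.zip_cons_cons, List.map_cons, mapPairs]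
      exact congrArg _ (zip_tail_eq_mapPairs idxs (b :: rest))

-- characterisation of the inner while loop
theorem segARun_spec (segs : List Int) (i j : Nat) (hj : j ≤ segs.length) :
    j ≤ segARun segs i j ∧ segARun segs i j ≤ segs.length ∧
      (∀ k, j ≤ k → k < segARun segs i j → segs.getD k 0 = segs.getD i 0) ∧
      (segARun segs i j < segs.length → segs.getD (segARun segs i j) 0 ≠ segs.getD i 0) := by
  by_cases h : j < segs.length ∧ segs.getD j 0 = segs.getD i 0
  · have heq : segARun segs i j = segARun segs i (j+1) := by rw [segARun, if_pos h]
    have ih := segARun_spec segs i (j+1) (by omega)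
    rw [heq]
    refine ⟨by omega, ih.2.1, ?_, ih.2.2.2⟩
    intro k hk1 hk2
    rcases Nat.eq_or_lt_of_le hk1 with he | hlt
    · rw [← he]; exact h.2
    · exact ih.2.2.1 k hlt hk2
  · have heq : segARun segs i j = j := by rw [segARun, if_neg h]
    rw [heq]
    refine ⟨Nat.le_refl _, hj, fun k hk1 hk2 => absurd hk1 (by omega), fun hr he => ?_⟩
    exact h ⟨hr, he⟩
termination_by segs.length - j

-- the change-point filter over [i+1, n) splits at r = segARun segs i (i+1)
theorem filter_split (segs : List Int) (i : Nat) (hi : i < segs.length) :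
    (List.range' (i+1) (segs.length - (i+1))).filter (fun k => segs.getD k 0 ≠ segs.getD (k-1) 0)
      = (if segARun segs i (i+1) < segs.length then
            segARun segs i (i+1) :: (List.range' (segARun segs i (i+1) + 1)
              (segs.length - (segARun segs i (i+1) + 1))).filter
              (fun k => segs.getD k 0 ≠ segs.getD (k-1) 0)
         else []) := by
  set n := segs.length with hn
  set r := segARun segs i (i+1) with hrdef
  obtain ⟨h1, h2, h3, h4⟩ := segARun_spec segs i (i+1) (by omega)
  rw [← hrdef] at h1 h2 h3 h4
  have hsplit : List.range' (i+1) (n - (i+1)) =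
      List.range' (i+1) (r - (i+1)) ++ List.range' r (n - r) := by
    have h := @List.range'_append_1 (i+1) (r-(i+1)) (n-r)
    have e1 : (i+1) + (r-(i+1)) = r := by omega
    have e2 : (r-(i+1)) + (n-r) = n - (i+1) := by omega
    rw [e1, e2] at h
    exact h.symm
  have hfalse : ∀ k ∈ List.range' (i+1) (r - (i+1)), segs.getD k 0 = segs.getD (k-1) 0 := by
    intro k hk
    rw [List.mem_range'_1] at hk
    have hkk : segs.getD k 0 = segs.getD i 0 := h3 k (by omega) (by omega)
    have hkm : segs.getD (k-1) 0 = segs.getD i 0 := by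
      rcases Nat.eq_or_lt_of_le hk.1 with he | hlt
      · have hki : k - 1 = i := by omega
        rw [hki]
      · exact h3 (k-1) (by omega) (by omega)
    rw [hkk, hkm]
  rw [hsplit, List.filter_append,
      List.filter_eq_nil_iff.mpr (by intro k hk; simpa using hfalse k hk), List.nil_append]
  by_cases hr : r < n
  · rw [if_pos hr]
    have hrtrue : segs.getD r 0 ≠ segs.getD (r-1) 0 := by
      have hrm : segs.getD (r-1) 0 = segs.getD i 0 := by
        rcases Nat.eq_or_lt_of_le h1 with he | hlt
        · have hri : r - 1 = i := by omega
          rw [hri]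
        · exact h3 (r-1) (by omega) (by omega)
      rw [hrm]; exact h4 hr
    have hnr : n - r = (n - (r+1)) + 1 := by omega
    rw [hnr, List.range'_succ, List.filter_cons, if_pos (by simpa using hrtrue)]
  · rw [if_neg hr]
    have hz : n - r = 0 := by omega
    rw [hz]
    rfl

-- main invariant: the outer loop from a run start i produces the pairs of the
-- change-point list i :: changes(i+1..n) ++ [n]
theorem loop_eq_pairs (idxs segs : List Int) (i : Nat) (hi : i < segs.length) :
    segALoop idxs segs i
      = mapPairs idxs (i :: (List.range' (i+1) (segs.length - (i+1))).filter
          (fun k => segs.getD k 0 ≠ segs.getD (k-1) 0) ++ [segs.length]) := by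
  rw [segALoop, dif_pos hi]
  show (idxs.getD i 0, idxs.getD (segARun segs i (i+1)) 0) ::
      segALoop idxs segs (segARun segs i (i+1)) = _
  rw [filter_split segs i hi]
  have h1 := (segARun_spec segs i (i+1) (by omega)).1
  have h2 := (segARun_spec segs i (i+1) (by omega)).2.1
  by_cases hr : segARun segs i (i+1) < segs.length
  · rw [if_pos hr, loop_eq_pairs idxs segs (segARun segs i (i+1)) hr]
    simp only [List.cons_append, mapPairs]
  · rw [if_neg hr]
    have hre : segARun segs i (i+1) = segs.length := by omega
    have hz : segALoop idxs segs segs.length = [] := by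
      rw [segALoop, dif_neg (by omega)]
    rw [hre, hz]
    simp [mapPairs]
termination_by segs.length - i
decreasing_by omega

-- ===== VERDICT (by name: the statement is the Claim_ definition above) =====
theorem seg_list_to_list_of_bounds_spec : Claim_equal_seg_list_to_list_of_bounds := by
  intro idxs segs _ _
  unfold Spec_seg_list_to_list_of_bounds seg_list_to_list_of_bounds seg_list_to_list_of_bounds_alt
  by_cases hs : segs = []
  · subst hs
    rw [segALoop]
    simp
  · rw [if_neg hs]
    have hlen : 0 < segs.length := List.length_pos_iff.mpr hs
    rw [zip_tail_eq_mapPairs]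
    have := loop_eq_pairs idxs segs 0 hlen
    simpa using this
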